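-- pv_equiv track=rewrite | github.com/baesh3744/algorithm-solutions | programmers/level1/4주차.py | solution
-- ===== SOURCE A (Python) =====
-- from typing import List
--
-- def index_of(string_list: List[str], target: str) -> int:
--     try:
--         return string_list.index(target)
--     except ValueError:
--         return -1
--
-- def solution(table: List[str], languages: List[str], preference: List[int]) -> str:
--     answer: str = ""
--     max_score: int = -1
--
--     for string in table:
--         job_score_list: List[str] = list(reversed(string.split()))
--         job_score_list, job = job_score_list[:-1], job_score_list[-1]
--
--         score: int = 0
--         for language, prf in zip(languages, preference):
--             score += prf * (index_of(job_score_list, language) + 1)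
--
--         if score == max_score:
--             answer = min(answer, job)
--         elif score > max_score:
--             max_score = score
--             answer = job
--
--     return answer
-- ===== SOURCE B (Python) =====
-- def solution(table, languages, preference):
--     # Phase 1: aggregate preferences into one language -> total-preference map.
--     pref = {}
--     for language, p in zip(languages, preference):
--         pref[language] = pref.get(language, 0) + p
--
--     # Phase 2: score every row by one token-driven pass (weight = reversed
--     # position + 1, counting only the first reversed occurrence of a token).
--     candidates = [(1, "")]
--     for row in table:
--         words = row.split()
--         rev = words[1:][::-1]
--         score = sum(pref.get(t, 0) * (i + 1)
--                     for i, t in enumerate(rev) if t not in rev[:i])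
--         candidates.append((-score, words[0]))
--
--     # Phase 3: select — min over (-score, job) gives max score, lexicographic
--     # tie-break; the (1, "") sentinel reproduces answer="" / max_score=-1.
--     return min(candidates)[1]
-- ===== Notes on version B (the rewrite author's own statement) =====
-- stated objective: faster
-- what changed: B inverts A's inner loop: preferences are aggregated once into a language->weight map for the whole table, each row is scored by a single token-driven pass (first reversed occurrence only) instead of one list.index scan per language, and the answer is selected by min over a prebuilt (-score, job) candidate list with a (1, "") sentinel instead of A's running-max/tie-min state.
import Mathlib
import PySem

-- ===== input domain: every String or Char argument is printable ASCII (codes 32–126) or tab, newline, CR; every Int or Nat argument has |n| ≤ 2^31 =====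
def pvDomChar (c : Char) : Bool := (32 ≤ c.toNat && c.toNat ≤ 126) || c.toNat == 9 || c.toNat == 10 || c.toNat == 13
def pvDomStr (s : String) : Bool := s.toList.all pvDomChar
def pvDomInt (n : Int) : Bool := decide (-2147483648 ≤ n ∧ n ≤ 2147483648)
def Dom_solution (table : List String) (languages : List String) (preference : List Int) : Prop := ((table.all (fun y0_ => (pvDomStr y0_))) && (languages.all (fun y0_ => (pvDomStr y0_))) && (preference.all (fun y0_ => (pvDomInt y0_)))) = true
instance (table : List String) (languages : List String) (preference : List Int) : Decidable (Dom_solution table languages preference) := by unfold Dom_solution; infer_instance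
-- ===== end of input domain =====

-- B inverts A's inner loop: preferences are aggregated once into a language→weight map for the whole
-- table, each row is scored by one token-driven pass (first reversed occurrence only), and the answer
-- is min over a prebuilt (-score, job) candidate list with a (1, "") sentinel.

-- ===== PORT A =====
def index_of (string_list : List String) (target : String) : Int :=
  match PySem.List.index? string_list target with
  | some i => (i : Int)
  | none => -1

def solnStepA (languages : List String) (preference : List Int)
    (st : String × Int) (string : String) : String × Int :=
  let jslFull := (PySem.Str.split₀ string).reverse
  match PySem.List.pyGet? jslFull (-1) with
  | none => st        -- Python raises IndexError here (row with no token); excluded by Pre_solution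
  | some job =>
    let job_score_list := PySem.List.slice jslFull none (some (-1))
    let score := (languages.zip preference).foldl
      (fun sc lp => sc + lp.2 * (index_of job_score_list lp.1 + 1)) 0
    if score == st.2 then (if st.1 ≤ job then st.1 else job, st.2)
    else if score > st.2 then (job, score)
    else st

def solution (table : List String) (languages : List String) (preference : List Int) : String :=
  (table.foldl (solnStepA languages preference) ("", -1)).1

-- ===== PORT B =====
def prefDict (languages : List String) (preference : List Int) : PySem.Dict String Int :=
  (languages.zip preference).foldl
    (fun d lp => d.insert lp.1 (d.getD lp.1 0 + lp.2)) PySem.Dict.empty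

def rowScoreB (pref : PySem.Dict String Int) (words : List String) : Int :=
  let rev := (PySem.List.slice words (some 1) none).reverse
  (((PySem.List.enumerate rev).filter
      (fun it => !((PySem.List.slice rev none (some it.1)).contains it.2))).map
    (fun it => pref.getD it.2 0 * (it.1 + 1))).sum

def solution_alt (table : List String) (languages : List String) (preference : List Int) : String :=
  let pref := prefDict languages preference
  let candidates := table.foldl (fun acc row =>
      let words := PySem.Str.split₀ row
      match PySem.List.pyGet? words 0 with
      | none => acc   -- Python raises IndexError here (row with no token); excluded by Pre_solution
      | some job => acc ++ [(-(rowScoreB pref words), job)]) [((1 : Int), "")]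
  match PySem.List.min2? candidates (fun p => p.1) (fun p => p.2) with
  | some p => p.2
  | none => ""

-- ===== PRECONDITION & SPEC =====
-- Pre_ excludes tables containing a row with no token (empty/whitespace-only string): there Python A
-- raises IndexError (and Python B raises IndexError too).
def Pre_solution (table : List String) (languages : List String) (preference : List Int) : Prop :=
  ∀ s ∈ table, PySem.Str.split₀ s ≠ []
instance (table : List String) (languages : List String) (preference : List Int) : Decidable (Pre_solution table languages preference) := by unfold Pre_solution; infer_instance

def pvWitness_solution : List String × List String × List Int :=
  (["frontend java python c", "backend python c java"], ["python", "java"], [5, 3])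

def Spec_solution (table : List String) (languages : List String) (preference : List Int) (out : String) : Prop := out = solution_alt table languages preference
instance (table : List String) (languages : List String) (preference : List Int) (out : String) : Decidable (Spec_solution table languages preference out) := by unfold Spec_solution; infer_instance

-- ===== CLAIM (what is proved, stated in full; the proofs are below) =====
def Claim_equal_solution : Prop := ∀ (table : List String) (languages : List String) (preference : List Int), Dom_solution table languages preference → Pre_solution table languages preference → Spec_solution table languages preference (solution table languages preference)

-- ===== LEMMAS AND PROOFS =====

-- A's running-max step, expressed on the (−score, job) pair that B builds per row.
def gstep (st : String × Int) (q : Int × String) : String × Int :=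
  if -q.1 == st.2 then (if st.1 ≤ q.2 then st.1 else q.2, st.2)
  else if -q.1 > st.2 then (q.2, -q.1)
  else st

-- first-occurrence weighted sum: B's per-row generator expression, structurally
def dsum (pre xs : List String) (f : String → Int) : Int :=
  match xs with
  | [] => 0
  | x :: xs' => (if x ∈ pre then 0 else f x * ((pre.length : Int) + 1)) + dsum (pre ++ [x]) xs' f

lemma dsum_bridge (xs : List String) : ∀ (pre : List String) (f : String → Int),
    (((PySem.List.enumerate xs (pre.length : Int)).filter
        (fun it => !((PySem.List.slice (pre ++ xs) none (some it.1)).contains it.2))).map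
      (fun it => f it.2 * (it.1 + 1))).sum = dsum pre xs f := by
  induction xs with
  | nil => intro pre f; simp [PySem.List.enumerate_nil, dsum]
  | cons x xs ih =>
    intro pre f
    have hsl : PySem.List.slice (pre ++ x :: xs) none (some (pre.length : Int)) = pre := by
      rw [PySem.List.slice_to_natCast, List.take_left]
    have htail := ih (pre ++ [x]) f
    simp only [List.length_append, List.length_cons, List.length_nil, Nat.cast_add,
      Nat.cast_one, List.append_assoc, List.singleton_append, Nat.cast_zero, zero_add] at htail
    rw [PySem.List.enumerate_cons, List.filter_cons]
    by_cases hx : x ∈ pre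
    · have hc : (!((PySem.List.slice (pre ++ x :: xs) none (some ((pre.length : Int)))).contains x)) = false := by
        simp [hsl, hx]
      simp only [hc, Bool.false_eq_true, if_false, dsum, if_pos hx, zero_add]
      exact htail
    · have hc : (!((PySem.List.slice (pre ++ x :: xs) none (some ((pre.length : Int)))).contains x)) = true := by
        simp [hsl, hx]
      simp only [hc, if_true, List.map_cons, List.sum_cons, dsum, if_neg hx]
      rw [htail]

lemma dsum_add (xs : List String) : ∀ (pre : List String) (f g : String → Int),
    dsum pre xs (fun t => f t + g t) = dsum pre xs f + dsum pre xs g := by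
  induction xs with
  | nil => intro pre f g; simp [dsum]
  | cons x xs ih =>
    intro pre f g
    simp only [dsum, ih]
    split_ifs <;> ring

lemma dsum_zero (xs : List String) : ∀ (pre : List String), dsum pre xs (fun _ => 0) = 0 := by
  induction xs with
  | nil => intro pre; simp [dsum]
  | cons x xs ih => intro pre; simp [dsum, ih]

lemma dsum_delta (xs : List String) : ∀ (pre : List String) (l : String) (p : Int),
    dsum pre xs (fun t => if l = t then p else 0) =
      if l ∈ pre then 0
      else p * (match PySem.List.index? xs l with
                | some k => (pre.length : Int) + (k : Int) + 1
                | none => 0) := by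
  induction xs with
  | nil =>
    intro pre l p
    simp [dsum, PySem.List.index?, List.idxOf?_nil]
  | cons x xs ih =>
    intro pre l p
    by_cases hlp : l ∈ pre
    · have hlp' : l ∈ pre ++ [x] := List.mem_append_left _ hlp
      simp only [dsum, ih, if_pos hlp, if_pos hlp', add_zero]
      by_cases hx : x ∈ pre
      · simp [hx]
      · have hlx : l ≠ x := fun h => hx (h ▸ hlp)
        simp [hx, hlx]
    · by_cases hxl : x = l
      · subst hxl
        have hx' : x ∈ pre ++ [x] := List.mem_append_right _ (by simp)
        simp only [dsum, ih, if_pos hx', if_neg hlp, add_zero]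
        rw [PySem.List.index?_cons_self]
        simp [hlp]
      · have hlx : ¬ l = x := fun h => hxl h.symm
        have hl' : ¬ l ∈ pre ++ [x] := by simp [hlp, hlx]
        have hix := PySem.List.index?_cons_of_ne (x := x) (xs := xs) (v := l) hxl
        simp only [dsum, ih, if_neg hl', if_neg hlp, if_neg hlx]
        rw [hix]
        rcases h : PySem.List.index? xs l with _ | k
        · simp [h]
        · simp only [h, Option.map_some]
          push_cast
          ring_nf
          split_ifs <;>
            (simp only [List.length_append, List.length_cons, List.length_nil]; push_cast; ring)

lemma prefDict_getD (Z : List (String × Int)) : ∀ (d : PySem.Dict String Int) (t : String),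
    (Z.foldl (fun d lp => d.insert lp.1 (d.getD lp.1 0 + lp.2)) d).getD t 0
      = d.getD t 0 + (Z.map (fun lp => if lp.1 = t then lp.2 else 0)).sum := by
  induction Z with
  | nil => intro d t; simp
  | cons lp Z ih =>
    intro d t
    simp only [List.foldl_cons, List.map_cons, List.sum_cons, ih, PySem.Dict.getD_insert]
    by_cases h : t = lp.1
    · simp [h, if_pos rfl]; ring
    · simp [h, if_neg (fun hh : lp.1 = t => h hh.symm)]

lemma dsum_main (Z : List (String × Int)) (xs : List String) :
    dsum [] xs (fun t => (Z.map (fun lp => if lp.1 = t then lp.2 else 0)).sum)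
      = (Z.map (fun lp => lp.2 * (index_of xs lp.1 + 1))).sum := by
  induction Z with
  | nil => simpa using dsum_zero xs []
  | cons lp Z ih =>
    simp only [List.map_cons, List.sum_cons]
    rw [show (fun t => (if lp.1 = t then lp.2 else 0) + (Z.map (fun lq => if lq.1 = t then lq.2 else 0)).sum)
          = (fun t => (fun t => if lp.1 = t then lp.2 else 0) t + (fun t => (Z.map (fun lq => if lq.1 = t then lq.2 else 0)).sum) t) from rfl] at *
    rw [dsum_add, ih, dsum_delta]
    simp only [List.not_mem_nil, if_false, List.length_nil, Nat.cast_zero]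
    unfold index_of
    rcases h : PySem.List.index? xs lp.1 with _ | k
    · simp [h]
    · simp only [h]; ring_nf

lemma pyGet_last (ys : List String) (x : String) :
    PySem.List.pyGet? (ys ++ [x]) (-1) = some x := by
  simp [PySem.List.pyGet?, PySem.List.pyIdx?]

-- per-row: A's loop body equals A's selection step applied to B's (−score, job) pair
lemma stepA_eq (languages : List String) (preference : List Int) (row : String)
    (h : PySem.Str.split₀ row ≠ []) (st : String × Int) :
    solnStepA languages preference st row
      = gstep st (-(rowScoreB (prefDict languages preference) (PySem.Str.split₀ row)),
          (PySem.Str.split₀ row).headD "") := by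
  rcases hs : PySem.Str.split₀ row with _ | ⟨job, rest⟩
  · exact absurd hs h
  · have hrev : (PySem.List.slice (job :: rest) (some 1) none).reverse = rest.reverse := by
      rw [PySem.List.slice_from_one]; rfl
    have hscore : rowScoreB (prefDict languages preference) (job :: rest)
        = (List.zip languages preference).foldl
            (fun sc lp => sc + lp.2 * (index_of rest.reverse lp.1 + 1)) 0 := by
      unfold rowScoreB
      rw [hrev]
      have hb := dsum_bridge rest.reverse [] (fun t => (prefDict languages preference).getD t 0)
      simp only [List.length_nil, Nat.cast_zero, List.nil_append] at hb
      rw [hb]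
      have hf : (fun t => (prefDict languages preference).getD t 0)
          = (fun t => ((languages.zip preference).map (fun lp => if lp.1 = t then lp.2 else 0)).sum) := by
        funext t
        rw [show prefDict languages preference
              = (languages.zip preference).foldl
                  (fun d lp => d.insert lp.1 (d.getD lp.1 0 + lp.2)) PySem.Dict.empty from rfl,
            prefDict_getD]
        simp
      rw [hf, dsum_main, PySem.List.foldl_add, zero_add]
    simp only [solnStepA, hs, List.reverse_cons, pyGet_last, PySem.List.slice_to_neg_one,
      List.dropLast_concat, gstep, hscore, neg_neg, List.headD_cons]

-- joining one step of B's min() fold with A's selection step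
lemma combine_eq_gstep (a : String) (s : Int) (q : Int × String) :
    (if (decide (q.1 < -s) || (!decide (-s < q.1) && decide (q.2 < a))) = true
      then q else (-s, a))
      = (-(gstep (a, s) q).2, (gstep (a, s) q).1) := by
  obtain ⟨q1, q2⟩ := q
  unfold gstep
  rcases lt_trichotomy q1 (-s) with h | h | h
  · have h1 : (-q1 == s) = false := by simp; omega
    have h2 : -q1 > s := by omega
    simp [h, h1, h2, not_lt_of_gt h]
  · have h1 : (-q1 == s) = true := by simp; omega
    by_cases h2 : q2 < a
    · simp [h, h1, h2, not_le_of_gt h2]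
    · simp [h, h1, h2, le_of_not_gt h2]
  · have h1 : (-q1 == s) = false := by simp; omega
    have h2 : ¬(-q1 > s) := by omega
    simp [not_lt_of_gt h, h, h1, h2]

lemma min2_shift (x y : Int × String) (t : List (Int × String)) :
    PySem.List.min2? (x :: y :: t) (fun p => p.1) (fun p => p.2)
      = PySem.List.min2?
          ((if (decide (y.1 < x.1) || (!decide (x.1 < y.1) && decide (y.2 < x.2))) = true
            then y else x) :: t) (fun p => p.1) (fun p => p.2) := by
  simp only [PySem.List.min2?, List.foldl_cons]
  congr 1
  split <;> simp

-- B's min() over the sentinel-headed pair list computes A's fold, state encoded as (−max_score, answer)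
lemma min2_eq_fold (qs : List (Int × String)) (a : String) (s : Int) :
    PySem.List.min2? ((-s, a) :: qs) (fun p => p.1) (fun p => p.2)
      = some (-(qs.foldl gstep (a, s)).2, (qs.foldl gstep (a, s)).1) := by
  induction qs generalizing a s with
  | nil => simp [PySem.List.min2?]
  | cons q t ih =>
    rw [min2_shift, combine_eq_gstep, ih, List.foldl_cons]

-- ===== VERDICT (by name: the statement is the Claim_ definition above) =====
theorem solution_spec : Claim_equal_solution := by
  intro table languages preference _ hpre
  unfold Spec_solution solution solution_alt
  have hcand : table.foldl (fun acc row =>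
      let words := PySem.Str.split₀ row
      match PySem.List.pyGet? words 0 with
      | none => acc
      | some job => acc ++ [(-(rowScoreB (prefDict languages preference) words), job)])
        [((1 : Int), "")]
      = [((1 : Int), "")] ++ table.map (fun row =>
          (-(rowScoreB (prefDict languages preference) (PySem.Str.split₀ row)),
            (PySem.Str.split₀ row).headD "")) := by
    rw [← PySem.List.foldl_append_singleton_eq_map]
    apply PySem.List.foldl_congr_mem
    intro acc row hrow
    rcases hs : PySem.Str.split₀ row with _ | ⟨job, rest⟩
    · exact absurd hs (hpre row hrow)
    · simp [hs, PySem.List.pyGet?, PySem.List.pyIdx?]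
  have hfold : List.foldl (solnStepA languages preference) ("", -1) table
      = List.foldl gstep ("", -1) (table.map (fun row =>
          (-(rowScoreB (prefDict languages preference) (PySem.Str.split₀ row)),
            (PySem.Str.split₀ row).headD ""))) := by
    rw [List.foldl_map]
    apply PySem.List.foldl_congr_mem
    intro acc row hrow
    exact stepA_eq languages preference row (hpre row hrow) acc
  simp only [hcand]
  have h1 : ((1 : Int), ("" : String)) = (-(-1 : Int), "") := by norm_num
  rw [h1, List.singleton_append, min2_eq_fold, hfold]
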